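-- pv_equiv track=rewrite | github.com/d25037/trading25 | apps/bt/src/application/services/strategy_dataset_metadata.py | union_market_lists
-- ===== SOURCE A (Python) =====
-- _PREFERRED_MARKET_ORDER = ("prime", "standard", "growth")
--
-- _MARKET_ALIAS_TO_CANONICAL = {
--     "prime": "prime",
--     "standard": "standard",
--     "growth": "growth",
--     "0111": "prime",
--     "0112": "standard",
--     "0113": "growth",
-- }
--
-- def canonicalize_market_list(markets: list[str]) -> list[str]:
--     canonical: list[str] = []
--     seen: set[str] = set()
--
--     for preferred in _PREFERRED_MARKET_ORDER:
--         if preferred in {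
--             _MARKET_ALIAS_TO_CANONICAL.get(market.lower(), market)
--             for market in markets
--         }:
--             canonical.append(preferred)
--             seen.add(preferred)
--
--     for market in markets:
--         normalized = _MARKET_ALIAS_TO_CANONICAL.get(market.lower(), market)
--         if normalized in seen:
--             continue
--         canonical.append(normalized)
--         seen.add(normalized)
--
--     return canonical
--
-- def union_market_lists(market_lists: list[list[str]]) -> list[str]:
--     union: list[str] = []
--     seen: set[str] = set()
--
--     for markets in market_lists:
--         for market in canonicalize_market_list(markets):
--             if market in seen:
--                 continue
--             union.append(market)
--             seen.add(market)
--
--     return canonicalize_market_list(union)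
-- ===== SOURCE B (Python) =====
-- _PREFERRED_MARKET_ORDER = ("prime", "standard", "growth")
--
-- _MARKET_ALIAS_TO_CANONICAL = {
--     "prime": "prime",
--     "standard": "standard",
--     "growth": "growth",
--     "0111": "prime",
--     "0112": "standard",
--     "0113": "growth",
-- }
--
--
-- def union_market_lists(market_lists: list[list[str]]) -> list[str]:
--     seen: set[str] = set()
--     others: list[str] = []
--     for markets in market_lists:
--         for market in markets:
--             normalized = _MARKET_ALIAS_TO_CANONICAL.get(market.lower(), market)
--             if normalized in seen:
--                 continue
--             seen.add(normalized)
--             if normalized not in _PREFERRED_MARKET_ORDER: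
--                 others.append(normalized)
--     return [p for p in _PREFERRED_MARKET_ORDER if p in seen] + others
-- ===== Notes on version B (the rewrite author's own statement) =====
-- stated objective: faster
-- what changed: B replaces A's per-sublist canonicalize (a preferred-order pass plus a dedup pass per list) and the final re-canonicalize with one single pass over all markets that normalizes and dedups into a seen set and a non-preferred first-occurrence list, emitting preferred markets present followed by the rest.
import Mathlib
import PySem

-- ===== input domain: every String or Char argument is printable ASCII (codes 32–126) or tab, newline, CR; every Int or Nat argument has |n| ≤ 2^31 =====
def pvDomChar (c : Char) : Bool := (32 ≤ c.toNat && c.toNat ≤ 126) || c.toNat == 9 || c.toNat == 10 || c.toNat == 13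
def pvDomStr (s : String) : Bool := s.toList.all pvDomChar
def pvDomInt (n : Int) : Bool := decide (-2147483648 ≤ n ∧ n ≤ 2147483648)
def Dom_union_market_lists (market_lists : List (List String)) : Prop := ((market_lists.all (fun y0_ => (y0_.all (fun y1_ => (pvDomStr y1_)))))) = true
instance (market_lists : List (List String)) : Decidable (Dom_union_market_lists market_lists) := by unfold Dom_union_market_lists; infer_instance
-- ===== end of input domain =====

-- B replaces A's per-sublist canonicalize passes and final re-canonicalize with one
-- normalize-dedup pass over all markets (objective: faster by a constant factor, measured).

-- ===== PORT A =====
-- module constants _PREFERRED_MARKET_ORDER and _MARKET_ALIAS_TO_CANONICAL (shared by both Pythons)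
def pvPref : List String := ["prime", "standard", "growth"]

def pvAlias : PySem.Dict String String :=
  PySem.Dict.ofList [("prime", "prime"), ("standard", "standard"), ("growth", "growth"),
                     ("0111", "prime"), ("0112", "standard"), ("0113", "growth")]

-- _MARKET_ALIAS_TO_CANONICAL.get(market.lower(), market)  (the expression both Pythons use verbatim)
def pvNorm (m : String) : String := PySem.Dict.getD pvAlias (PySem.Str.lower m) m

def canonicalize_market_list (markets : List String) : List String :=
  (markets.foldl
    (fun st market =>
      let normalized := pvNorm market
      if normalized ∈ st.2 then st
      else (st.1 ++ [normalized], PySem.Set.add st.2 normalized))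
    (pvPref.foldl
      (fun st preferred =>
        if preferred ∈ PySem.Set.ofList (markets.map pvNorm) then
          (st.1 ++ [preferred], PySem.Set.add st.2 preferred)
        else st)
      ([], PySem.Set.empty))).1

def union_market_lists (market_lists : List (List String)) : List String :=
  canonicalize_market_list
    (market_lists.foldl
      (fun st markets =>
        (canonicalize_market_list markets).foldl
          (fun st market =>
            if market ∈ st.2 then st
            else (st.1 ++ [market], PySem.Set.add st.2 market)) st)
      ([], PySem.Set.empty)).1

-- ===== PORT B =====
def union_market_lists_alt (market_lists : List (List String)) : List String :=
  (fun st : PySem.Set String × List String =>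
      pvPref.filter (fun p => decide (p ∈ st.1)) ++ st.2)
    (market_lists.foldl
      (fun st markets =>
        markets.foldl
          (fun st market =>
            let normalized := pvNorm market
            if normalized ∈ st.1 then st
            else (PySem.Set.add st.1 normalized,
                  if normalized ∈ pvPref then st.2 else st.2 ++ [normalized])) st)
      (PySem.Set.empty, []))

-- ===== PRECONDITION & SPEC =====
def Spec_union_market_lists (market_lists : List (List String)) (out : List String) : Prop := out = union_market_lists_alt market_lists
instance (market_lists : List (List String)) (out : List String) : Decidable (Spec_union_market_lists market_lists out) := by unfold Spec_union_market_lists; infer_instance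

-- ===== CLAIM (what is proved, stated in full; the proofs are below) =====
def Claim_equal_union_market_lists : Prop := ∀ (market_lists : List (List String)), Dom_union_market_lists market_lists → Spec_union_market_lists market_lists (union_market_lists market_lists)

-- ===== LEMMAS AND PROOFS =====
-- first-occurrence dedup with an explicit seen set (the common shape of every loop above)
def ddAux (s : PySem.Set String) : List String → List String
  | [] => []
  | x :: l => if x ∈ s then ddAux s l else x :: ddAux (PySem.Set.add s x) l

-- the Bool predicate "not preferred"
def notP (x : String) : Bool := !(decide (x ∈ pvPref))

theorem add_eq_of_mem {s : PySem.Set String} {x : String} (h : x ∈ s) :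
    PySem.Set.add s x = s := by
  simp [PySem.Set.add, PySem.Set.contains, h]

theorem mem_foldl_add (a : List String) (s : PySem.Set String) (y : String) :
    y ∈ a.foldl PySem.Set.add s ↔ y ∈ s ∨ y ∈ a := by
  induction a generalizing s with
  | nil => simp
  | cons x l ih => simp [ih, PySem.Set.mem_add, or_assoc]

theorem ddAux_congr {s s' : PySem.Set String} (l : List String)
    (h : ∀ y, y ∈ s ↔ y ∈ s') : ddAux s l = ddAux s' l := by
  induction l generalizing s s' with
  | nil => rfl
  | cons x l ih =>
      simp only [ddAux]
      by_cases hx : x ∈ s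
      · rw [if_pos hx, if_pos ((h x).mp hx), ih h]
      · rw [if_neg hx, if_neg (fun hc => hx ((h x).mpr hc))]
        exact congrArg (x :: ·) (ih (fun y => by simp [PySem.Set.mem_add, h y]))

theorem mem_ddAux {s : PySem.Set String} {l : List String} {y : String} :
    y ∈ ddAux s l ↔ y ∈ l ∧ y ∉ s := by
  induction l generalizing s with
  | nil => simp [ddAux]
  | cons x l ih =>
      simp only [ddAux]
      by_cases hx : x ∈ s
      · simp only [if_pos hx, ih, List.mem_cons]
        constructor
        · rintro ⟨hy, hys⟩; exact ⟨Or.inr hy, hys⟩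
        · rintro ⟨hy | hy, hys⟩
          · exact absurd (hy ▸ hx) hys
          · exact ⟨hy, hys⟩
      · simp only [if_neg hx, List.mem_cons, ih, PySem.Set.mem_add]
        constructor
        · rintro (rfl | ⟨hy, hys⟩)
          · exact ⟨Or.inl rfl, hx⟩
          · exact ⟨Or.inr hy, fun hc => hys (Or.inl hc)⟩
        · rintro ⟨rfl | hy, hys⟩
          · exact Or.inl rfl
          · by_cases hyx : y = x
            · exact Or.inl hyx
            · exact Or.inr ⟨hy, fun hc => (hc.elim hys hyx)⟩

theorem ddAux_append (s : PySem.Set String) (a b : List String) :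
    ddAux s (a ++ b) = ddAux s a ++ ddAux (a.foldl PySem.Set.add s) b := by
  induction a generalizing s with
  | nil => rfl
  | cons x l ih =>
      simp only [List.cons_append, ddAux, List.foldl_cons]
      by_cases hx : x ∈ s
      · rw [if_pos hx, if_pos hx, ih, add_eq_of_mem hx]
      · rw [if_neg hx, if_neg hx, ih, List.cons_append]

theorem nodup_ddAux (s : PySem.Set String) (l : List String) : (ddAux s l).Nodup := by
  induction l generalizing s with
  | nil => simp [ddAux]
  | cons x l ih =>
      simp only [ddAux]
      by_cases hx : x ∈ s
      · rw [if_pos hx]; exact ih s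
      · rw [if_neg hx]
        refine List.nodup_cons.mpr ⟨fun hc => ?_, ih _⟩
        exact (mem_ddAux.mp hc).2 (PySem.Set.mem_add _ _ _ |>.mpr (Or.inr rfl))

theorem ddAux_eq_filter {l : List String} (h : l.Nodup) (s : PySem.Set String) :
    ddAux s l = l.filter (fun x => decide (x ∉ s)) := by
  induction l generalizing s with
  | nil => rfl
  | cons x l ih =>
      have h2 := List.nodup_cons.mp h
      simp only [ddAux]
      by_cases hx : x ∈ s
      · rw [if_pos hx, List.filter_cons_of_neg (by simpa using hx)]
        exact ih h2.2 s
      · rw [if_neg hx, List.filter_cons_of_pos (by simpa using hx), ih h2.2]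
        exact congrArg (x :: ·) (List.filter_congr (fun y hy => by
          have hyx : y ≠ x := fun hc => h2.1 (hc ▸ hy)
          simp [PySem.Set.mem_add, hyx]))

theorem filter_ddAux (P : String → Bool) {s s' : PySem.Set String} (l : List String)
    (h : ∀ y, P y = true → (y ∈ s ↔ y ∈ s')) :
    (ddAux s l).filter P = ddAux s' (l.filter P) := by
  induction l generalizing s s' with
  | nil => rfl
  | cons x l ih =>
      by_cases hP : P x = true
      · rw [List.filter_cons_of_pos hP]
        simp only [ddAux]
        by_cases hx : x ∈ s
        · rw [if_pos hx, if_pos ((h x hP).mp hx)]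
          exact ih h
        · rw [if_neg hx, if_neg (fun hc => hx ((h x hP).mpr hc)),
            List.filter_cons_of_pos hP]
          exact congrArg (x :: ·) (ih (fun y hy => by simp [PySem.Set.mem_add, h y hy]))
      · rw [List.filter_cons_of_neg (by simpa using hP)]
        simp only [ddAux]
        by_cases hx : x ∈ s
        · rw [if_pos hx]
          exact ih h
        · rw [if_neg hx, List.filter_cons_of_neg (by simpa using hP)]
          exact ih (fun y hy => by
            have hyx : y ≠ x := fun hc => hP (hc ▸ hy)
            simp [PySem.Set.mem_add, hyx, h y hy])

theorem ddAux_ddAux {s s' : PySem.Set String} (l : List String)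
    (h : ∀ y, y ∈ s' → y ∈ s) : ddAux s (ddAux s' l) = ddAux s l := by
  induction l generalizing s s' with
  | nil => rfl
  | cons x l ih =>
      simp only [ddAux]
      by_cases hx' : x ∈ s'
      · rw [if_pos hx', if_pos (h x hx'), ih h]
      · rw [if_neg hx']
        by_cases hx : x ∈ s
        · rw [ddAux, if_pos hx, if_pos hx]
          exact ih (fun y hy => (PySem.Set.mem_add _ _ _ |>.mp hy).elim (h y) (fun e => e ▸ hx))
        · rw [ddAux, if_neg hx, if_neg hx]
          congr 1
          exact ih (fun y hy => by
            rcases (PySem.Set.mem_add _ _ _).mp hy with hy | rfl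
            · exact (PySem.Set.mem_add _ _ _).mpr (Or.inl (h y hy))
            · exact (PySem.Set.mem_add _ _ _).mpr (Or.inr rfl))

theorem ddAux_flatten_dedup (L : List (List String)) (s : PySem.Set String) :
    ddAux s (L.map (fun l => ddAux PySem.Set.empty l)).flatten = ddAux s L.flatten := by
  induction L generalizing s with
  | nil => rfl
  | cons l L ih =>
      simp only [List.map_cons, List.flatten_cons, ddAux_append]
      rw [ddAux_ddAux l (fun y hy => by simp [PySem.Set.empty] at hy), ih]
      congr 1
      refine ddAux_congr _ (fun y => ?_)
      rw [mem_foldl_add, mem_foldl_add, mem_ddAux]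
      constructor
      · rintro (hy | ⟨hy, -⟩)
        · exact Or.inl hy
        · exact Or.inr hy
      · rintro (hy | hy)
        · exact Or.inl hy
        · by_cases hs : y ∈ s
          · exact Or.inl hs
          · exact Or.inr ⟨hy, by simp [PySem.Set.empty]⟩

-- the append-if-unseen fold (A's union loop) is ddAux
theorem foldA (l : List String) (acc : List String) (s : PySem.Set String) :
    l.foldl (fun st x => if x ∈ st.2 then st else (st.1 ++ [x], PySem.Set.add st.2 x)) (acc, s)
      = (acc ++ ddAux s l, l.foldl PySem.Set.add s) := by
  induction l generalizing acc s with
  | nil => simp [ddAux]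
  | cons x l ih =>
      simp only [List.foldl_cons, ddAux]
      by_cases hx : x ∈ s
      · rw [if_pos hx, if_pos hx, ih, add_eq_of_mem hx]
      · rw [if_neg hx, if_neg hx, ih, List.append_assoc]
        rfl

-- A's canonicalize pass 2 (normalize then append-if-unseen) is ddAux over the normalized list
theorem foldA_norm (ms : List String) (acc : List String) (s : PySem.Set String) :
    ms.foldl (fun st market =>
        let normalized := pvNorm market
        if normalized ∈ st.2 then st
        else (st.1 ++ [normalized], PySem.Set.add st.2 normalized)) (acc, s)
      = (acc ++ ddAux s (ms.map pvNorm), (ms.map pvNorm).foldl PySem.Set.add s) := by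
  induction ms generalizing acc s with
  | nil => simp [ddAux]
  | cons x l ih =>
      simp only [List.foldl_cons, List.map_cons, ddAux]
      by_cases hx : pvNorm x ∈ s
      · rw [if_pos hx, if_pos hx, ih, add_eq_of_mem hx]
      · rw [if_neg hx, if_neg hx, ih, List.append_assoc]
        rfl

-- A's canonicalize pass 1 (over the preferred tuple) is a filter
theorem foldP (nsl : List String) (ps acc : List String) (s : PySem.Set String) :
    ps.foldl (fun st preferred =>
        if preferred ∈ PySem.Set.ofList nsl then
          (st.1 ++ [preferred], PySem.Set.add st.2 preferred)
        else st) (acc, s)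
      = (acc ++ ps.filter (fun p => decide (p ∈ PySem.Set.ofList nsl)),
         (ps.filter (fun p => decide (p ∈ PySem.Set.ofList nsl))).foldl PySem.Set.add s) := by
  induction ps generalizing acc s with
  | nil => simp
  | cons p ps ih =>
      simp only [List.foldl_cons]
      by_cases hp : p ∈ PySem.Set.ofList nsl
      · rw [if_pos hp, ih, List.filter_cons_of_pos (by simpa using hp), List.append_assoc,
          List.foldl_cons]
        rfl
      · rw [if_neg hp, ih, List.filter_cons_of_neg (by simpa using hp)]

-- B's inner loop
theorem foldB_norm (ms : List String) (s : PySem.Set String) (o : List String) :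
    ms.foldl (fun st market =>
        let normalized := pvNorm market
        if normalized ∈ st.1 then st
        else (PySem.Set.add st.1 normalized,
              if normalized ∈ pvPref then st.2 else st.2 ++ [normalized])) (s, o)
      = ((ms.map pvNorm).foldl PySem.Set.add s, o ++ (ddAux s (ms.map pvNorm)).filter notP) := by
  induction ms generalizing s o with
  | nil => simp [ddAux]
  | cons x l ih =>
      simp only [List.foldl_cons, List.map_cons, ddAux]
      by_cases hx : pvNorm x ∈ s
      · rw [if_pos hx, if_pos hx, ih, add_eq_of_mem hx]
      · rw [if_neg hx, if_neg hx, ih]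
        by_cases hp : pvNorm x ∈ pvPref
        · rw [if_pos hp, List.filter_cons_of_neg (by simp [notP, hp])]
        · rw [if_neg hp, List.filter_cons_of_pos (by simp [notP, hp]), List.append_assoc]
          rfl

-- A's outer union loop runs over the flattened canonicalized lists
theorem foldl_canon_flatten (g : (List String × PySem.Set String) → String → (List String × PySem.Set String))
    (L : List (List String)) (init : List String × PySem.Set String) :
    L.foldl (fun st markets => (canonicalize_market_list markets).foldl g st) init
      = (L.map canonicalize_market_list).flatten.foldl g init := by
  induction L generalizing init with
  | nil => rfl
  | cons ms L ih =>
      simp only [List.foldl_cons, List.map_cons, List.flatten_cons, List.foldl_append, ih]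

theorem pvAlias_items : pvAlias.items
    = [("prime", "prime"), ("standard", "standard"), ("growth", "growth"),
       ("0111", "prime"), ("0112", "standard"), ("0113", "growth")] := by decide

theorem pvNorm_def (m : String) : pvNorm m =
    (if PySem.Str.lower m = "prime" then "prime"
     else if PySem.Str.lower m = "standard" then "standard"
     else if PySem.Str.lower m = "growth" then "growth"
     else if PySem.Str.lower m = "0111" then "prime"
     else if PySem.Str.lower m = "0112" then "standard"
     else if PySem.Str.lower m = "0113" then "growth"
     else m) := by
  by_cases h1 : PySem.Str.lower m = "prime"
  · rw [if_pos h1]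
    simp [pvNorm, PySem.Dict.getD, PySem.Dict.get?, pvAlias_items, h1]
  rw [if_neg h1]
  by_cases h2 : PySem.Str.lower m = "standard"
  · rw [if_pos h2]
    simp [pvNorm, PySem.Dict.getD, PySem.Dict.get?, pvAlias_items, List.find?, h2]
  rw [if_neg h2]
  by_cases h3 : PySem.Str.lower m = "growth"
  · rw [if_pos h3]
    simp [pvNorm, PySem.Dict.getD, PySem.Dict.get?, pvAlias_items, List.find?, h3]
  rw [if_neg h3]
  by_cases h4 : PySem.Str.lower m = "0111"
  · rw [if_pos h4]
    simp [pvNorm, PySem.Dict.getD, PySem.Dict.get?, pvAlias_items, List.find?, h4]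
  rw [if_neg h4]
  by_cases h5 : PySem.Str.lower m = "0112"
  · rw [if_pos h5]
    simp [pvNorm, PySem.Dict.getD, PySem.Dict.get?, pvAlias_items, List.find?, h5]
  rw [if_neg h5]
  by_cases h6 : PySem.Str.lower m = "0113"
  · rw [if_pos h6]
    simp [pvNorm, PySem.Dict.getD, PySem.Dict.get?, pvAlias_items, List.find?, h6]
  rw [if_neg h6]
  have g1 : (("prime" : String) == PySem.Str.lower m) = false := beq_eq_false_iff_ne.mpr (Ne.symm h1)
  have g2 : (("standard" : String) == PySem.Str.lower m) = false := beq_eq_false_iff_ne.mpr (Ne.symm h2)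
  have g3 : (("growth" : String) == PySem.Str.lower m) = false := beq_eq_false_iff_ne.mpr (Ne.symm h3)
  have g4 : (("0111" : String) == PySem.Str.lower m) = false := beq_eq_false_iff_ne.mpr (Ne.symm h4)
  have g5 : (("0112" : String) == PySem.Str.lower m) = false := beq_eq_false_iff_ne.mpr (Ne.symm h5)
  have g6 : (("0113" : String) == PySem.Str.lower m) = false := beq_eq_false_iff_ne.mpr (Ne.symm h6)
  simp [pvNorm, PySem.Dict.getD, PySem.Dict.get?, pvAlias_items, List.find?, g1, g2, g3, g4, g5, g6]

-- every normalized market is preferred or fixed by normalization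
theorem norm_cases (m : String) : pvNorm m ∈ pvPref ∨ pvNorm m = m := by
  rw [pvNorm_def]
  split_ifs <;> simp [pvPref]

theorem norm_fix_pref {p : String} (h : p ∈ pvPref) : pvNorm p = p := by
  simp only [pvPref, List.mem_cons, List.not_mem_nil, or_false] at h
  rcases h with rfl | rfl | rfl <;> decide

theorem ddAux_empty_of_nodup {l : List String} (h : l.Nodup) :
    ddAux PySem.Set.empty l = l := by
  rw [ddAux_eq_filter h]
  exact List.filter_eq_self.mpr (fun a _ => by simp [PySem.Set.empty])

-- a seen set holding exactly the preferred markets present lets pass 2 keep only non-preferred ones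
theorem ddAux_prefseen {s : PySem.Set String} (ns : List String)
    (hs : ∀ y, y ∈ s ↔ (y ∈ pvPref ∧ y ∈ ns)) :
    ddAux s ns = ddAux PySem.Set.empty (ns.filter notP) := by
  have h1 : (ddAux s ns).filter notP = ddAux s ns := by
    refine List.filter_eq_self.mpr (fun y hy => ?_)
    rcases mem_ddAux.mp hy with ⟨hyn, hyS⟩
    by_cases hp : y ∈ pvPref
    · exact absurd ((hs y).mpr ⟨hp, hyn⟩) hyS
    · simp [notP, hp]
  rw [← h1]
  exact filter_ddAux notP ns (fun y hy => by
    have hp : y ∉ pvPref := by simpa [notP] using hy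
    simp [hs, PySem.Set.empty, hp])

-- the canonical form of canonicalize_market_list
theorem canon_eq (ms : List String) :
    canonicalize_market_list ms
      = pvPref.filter (fun p => decide (p ∈ ms.map pvNorm))
        ++ ddAux PySem.Set.empty ((ms.map pvNorm).filter notP) := by
  unfold canonicalize_market_list
  rw [foldP (ms.map pvNorm) pvPref [] PySem.Set.empty, foldA_norm]
  have hfc : pvPref.filter (fun p => decide (p ∈ PySem.Set.ofList (ms.map pvNorm)))
      = pvPref.filter (fun p => decide (p ∈ ms.map pvNorm)) :=
    List.filter_congr (fun y _ => by simp [PySem.Set.mem_ofList])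
  rw [hfc]
  simp only [List.nil_append]
  congr 1
  refine ddAux_prefseen (ms.map pvNorm) (fun y => ?_)
  rw [mem_foldl_add]
  simp [PySem.Set.empty, List.mem_filter]

theorem union_eq (L : List (List String)) :
    union_market_lists L
      = canonicalize_market_list
          (ddAux PySem.Set.empty (L.map canonicalize_market_list).flatten) := by
  unfold union_market_lists
  rw [foldl_canon_flatten, foldA]
  simp

-- the filtered canonical list is the deduped filtered normalized list
theorem canon_filter_notP (ms : List String) :
    (canonicalize_market_list ms).filter notP
      = ddAux PySem.Set.empty ((ms.map pvNorm).filter notP) := by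
  rw [canon_eq, List.filter_append,
    List.filter_eq_nil_iff.mpr (fun a ha => by
      have := (List.mem_filter.mp ha).1
      simp [notP, this]), List.nil_append]
  exact List.filter_eq_self.mpr (fun a ha => (List.mem_filter.mp (mem_ddAux.mp ha).1).2)

theorem alt_eq (L : List (List String)) :
    union_market_lists_alt L
      = pvPref.filter (fun p => decide (p ∈ (L.flatten.map pvNorm)))
        ++ ddAux PySem.Set.empty ((L.flatten.map pvNorm).filter notP) := by
  unfold union_market_lists_alt
  rw [← List.foldl_flatten, foldB_norm]
  simp only [List.nil_append]
  congr 2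
  · funext p
    simp [mem_foldl_add, PySem.Set.empty]
  · exact filter_ddAux (s' := PySem.Set.empty) notP (L.flatten.map pvNorm) (fun y _ => Iff.rfl)

theorem a_eq (L : List (List String)) :
    union_market_lists L
      = pvPref.filter (fun p => decide (p ∈ (L.flatten.map pvNorm)))
        ++ ddAux PySem.Set.empty ((L.flatten.map pvNorm).filter notP) := by
  rw [union_eq]
  have hWsub : ∀ y ∈ (L.map canonicalize_market_list).flatten, pvNorm y = y := by
    intro y hy
    rcases List.mem_flatten.mp hy with ⟨cl, hcl, hycl⟩
    rcases List.mem_map.mp hcl with ⟨ms, hms, rfl⟩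
    rw [canon_eq] at hycl
    rcases List.mem_append.mp hycl with hyp | hyd
    · exact norm_fix_pref (List.mem_filter.mp hyp).1
    · rcases mem_ddAux.mp hyd with ⟨hyf, -⟩
      rcases List.mem_filter.mp hyf with ⟨hyn, hnp⟩
      rcases List.mem_map.mp hyn with ⟨m, _, rfl⟩
      rcases norm_cases m with hc | hc
      · exact absurd hc (by simpa [notP] using hnp)
      · rw [hc]; exact hc
  have hWpref : ∀ p ∈ pvPref,
      (p ∈ (L.map canonicalize_market_list).flatten ↔ p ∈ L.flatten.map pvNorm) := by
    intro p hp
    constructor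
    · intro hw
      rcases List.mem_flatten.mp hw with ⟨cl, hcl, hpcl⟩
      rcases List.mem_map.mp hcl with ⟨ms, hms, rfl⟩
      rw [canon_eq] at hpcl
      rcases List.mem_append.mp hpcl with hyp | hyd
      · have hpn : p ∈ ms.map pvNorm := by simpa using (List.mem_filter.mp hyp).2
        rcases List.mem_map.mp hpn with ⟨m, hm, rfl⟩
        exact List.mem_map.mpr ⟨m, List.mem_flatten.mpr ⟨ms, hms, hm⟩, rfl⟩
      · exact absurd hp (by simpa [notP] using (List.mem_filter.mp (mem_ddAux.mp hyd).1).2)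
    · intro hn
      rcases List.mem_map.mp hn with ⟨m, hm, rfl⟩
      rcases List.mem_flatten.mp hm with ⟨ms, hms, hmms⟩
      refine List.mem_flatten.mpr
        ⟨canonicalize_market_list ms, List.mem_map.mpr ⟨ms, hms, rfl⟩, ?_⟩
      rw [canon_eq]
      refine List.mem_append.mpr (Or.inl (List.mem_filter.mpr ⟨hp, ?_⟩))
      simpa using List.mem_map.mpr ⟨m, hmms, rfl⟩
  rw [canon_eq]
  have hUfix : (ddAux PySem.Set.empty (L.map canonicalize_market_list).flatten).map pvNorm
      = ddAux PySem.Set.empty (L.map canonicalize_market_list).flatten := by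
    rw [List.map_congr_left (fun y hy => hWsub y (mem_ddAux.mp hy).1)]
    simp
  rw [hUfix]
  congr 1
  · refine List.filter_congr (fun p hp => ?_)
    have h1 : p ∈ ddAux PySem.Set.empty (L.map canonicalize_market_list).flatten
        ↔ p ∈ (L.map canonicalize_market_list).flatten := by
      rw [mem_ddAux]; simp [PySem.Set.empty]
    simp only [decide_eq_decide]
    rw [h1]
    exact hWpref p hp
  · rw [ddAux_empty_of_nodup
        ((nodup_ddAux PySem.Set.empty (L.map canonicalize_market_list).flatten).filter notP),
      filter_ddAux notP ((L.map canonicalize_market_list).flatten) (fun y _ => Iff.rfl),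
      List.map_flatten, List.filter_flatten, List.map_map, List.filter_flatten, List.map_map,
      show L.map (List.filter notP ∘ canonicalize_market_list)
          = (L.map (fun ms => (ms.map pvNorm).filter notP)).map (fun l => ddAux PySem.Set.empty l) from by
        rw [List.map_map]
        exact List.map_congr_left (fun ms _ => by
          simp only [Function.comp_apply]
          exact canon_filter_notP ms),
      ddAux_flatten_dedup]
    exact congrArg _ (congrArg List.flatten (List.map_congr_left (fun ms _ => by
      simp only [Function.comp_apply])))

-- ===== VERDICT (by name: the statement is the Claim_ definition above) =====
theorem union_market_lists_spec : Claim_equal_union_market_lists := by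
  intro L _
  unfold Spec_union_market_lists
  rw [a_eq, alt_eq]
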